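-- pv_equiv track=rewrite | github.com/saharaliabdou/Python-projects | kalahaprojektvt_21.py | move_stones_player_two
-- ===== SOURCE A (Python) =====
-- def move_stones_player_two(amountStones,chosen_pot,board):
--     """"A function that moves the stones for player two between the pots and store.."""
--     while amountStones > 0:
--
--         if chosen_pot <= 12 and chosen_pot > 7:
--             board[chosen_pot -1 ] += 1
--             chosen_pot = chosen_pot - 1
--
--         elif chosen_pot == 7:
--             board[13] += 1
--             chosen_pot = 13
--
--         elif chosen_pot <= 5 and chosen_pot > 0:
--             board[chosen_pot -1] += 1
--             chosen_pot = chosen_pot -1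
--
--         elif chosen_pot == 0:
--             board[12] += 1
--             chosen_pot = 12
--
--         elif chosen_pot == 13:
--             board[5] += 1
--             chosen_pot = 5
--         amountStones -= 1
--     return chosen_pot
-- ===== SOURCE B (Python) =====
-- def move_stones_player_two(amountStones, chosen_pot, board):
--     """Closed-form sowing: the pot sequence is a fixed 13-cycle, so add whole laps with
--     divmod and read the final pot directly instead of stepping stone by stone."""
--     CYCLE = [12, 11, 10, 9, 8, 7, 13, 5, 4, 3, 2, 1, 0]
--     if amountStones <= 0 or chosen_pot not in CYCLE:
--         return chosen_pot
--     pos = CYCLE.index(chosen_pot)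
--     laps, extra = divmod(amountStones, 13)
--     for i in range(13):
--         gain = laps + (1 if i < extra else 0)
--         if gain:
--             board[CYCLE[(pos + 1 + i) % 13]] += gain
--     return CYCLE[(pos + amountStones) % 13]
-- ===== Notes on version B (the rewrite author's own statement) =====
-- stated objective: alternative
-- what changed: B replaces the stone-by-stone while-loop over the fixed 13-pot cycle with a divmod: whole laps and the remainder are added to each pot in one 13-step pass and the final pot is read off the cycle directly.
-- outside the precondition, e.g. on move_stones_player_two(1, 12, [0, 0, 0, 0, 0, 0, 0, 0, 0, 0, 0, 0]): A returns 11, B returns 11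
import Mathlib
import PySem

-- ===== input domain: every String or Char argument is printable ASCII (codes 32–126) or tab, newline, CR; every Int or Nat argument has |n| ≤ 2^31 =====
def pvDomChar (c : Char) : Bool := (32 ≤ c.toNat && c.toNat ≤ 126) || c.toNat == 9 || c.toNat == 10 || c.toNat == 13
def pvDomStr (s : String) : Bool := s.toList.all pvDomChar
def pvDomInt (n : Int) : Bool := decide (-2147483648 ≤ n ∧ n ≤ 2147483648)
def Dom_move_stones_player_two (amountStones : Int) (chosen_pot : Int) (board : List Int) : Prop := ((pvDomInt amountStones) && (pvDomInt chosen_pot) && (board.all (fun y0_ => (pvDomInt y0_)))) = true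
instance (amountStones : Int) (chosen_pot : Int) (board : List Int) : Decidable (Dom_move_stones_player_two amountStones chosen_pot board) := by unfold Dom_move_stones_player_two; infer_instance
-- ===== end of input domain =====

-- B replaces A's stone-by-stone while-loop with a divmod over the fixed 13-pot cycle.
-- A mutates `board` in place; both Pythons produce the same final board, but the equivalence
-- proved here is about the RETURN value only, so the ports drop the board writes.

-- ===== PORT A =====
-- one iteration of A's while-loop body (board writes dropped: return value only)
def pvStep (cp : Int) : Int :=
  if cp ≤ 12 ∧ cp > 7 then cp - 1
  else if cp = 7 then 13
  else if cp ≤ 5 ∧ cp > 0 then cp - 1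
  else if cp = 0 then 12
  else if cp = 13 then 5
  else cp

-- A's while-loop: amountStones is decremented once per iteration, so it runs amountStones.toNat times
def pvGo : Nat → Int → Int
  | 0, cp => cp
  | n + 1, cp => pvGo n (pvStep cp)

def move_stones_player_two (amountStones : Int) (chosen_pot : Int) (board : List Int) : Int :=
  pvGo amountStones.toNat chosen_pot

-- ===== PORT B =====
def pvCycle : List Int := [12, 11, 10, 9, 8, 7, 13, 5, 4, 3, 2, 1, 0]

def move_stones_player_two_alt (amountStones : Int) (chosen_pot : Int) (board : List Int) : Int :=
  if amountStones ≤ 0 ∨ chosen_pot ∉ pvCycle then chosen_pot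
  else
    match PySem.List.index? pvCycle chosen_pot with
    | none => chosen_pot  -- unreachable: chosen_pot ∈ pvCycle
    | some pos =>
      -- CYCLE[(pos + amountStones) % 13]; the index is provably in [0,13), so the default is never used
      PySem.List.pyGetD pvCycle (PySem.Int.mod ((pos : Int) + amountStones) 13) 0

-- ===== PRECONDITION & SPEC =====
-- Pre_ excludes boards shorter than 14 when sowing actually happens (positive stones, pot on the
-- cycle): there A can raise IndexError mid-sowing; it also excludes a few such short boards the
-- sowing happens not to overrun, on which A still returns (see the cited example).
def Pre_move_stones_player_two (amountStones : Int) (chosen_pot : Int) (board : List Int) : Prop :=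
  amountStones ≤ 0 ∨ chosen_pot ∉ pvCycle ∨ 14 ≤ board.length

instance (amountStones : Int) (chosen_pot : Int) (board : List Int) : Decidable (Pre_move_stones_player_two amountStones chosen_pot board) := by unfold Pre_move_stones_player_two; infer_instance

def pvWitness_move_stones_player_two : Int × Int × List Int :=
  (20, 9, [4, 4, 4, 4, 4, 4, 0, 4, 4, 4, 4, 4, 4, 0])

def Spec_move_stones_player_two (amountStones : Int) (chosen_pot : Int) (board : List Int) (out : Int) : Prop := out = move_stones_player_two_alt amountStones chosen_pot board
instance (amountStones : Int) (chosen_pot : Int) (board : List Int) (out : Int) : Decidable (Spec_move_stones_player_two amountStones chosen_pot board out) := by unfold Spec_move_stones_player_two; infer_instance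

-- ===== CLAIM (what is proved, stated in full; the proofs are below) =====
def Claim_equal_move_stones_player_two : Prop := ∀ (amountStones : Int) (chosen_pot : Int) (board : List Int), Dom_move_stones_player_two amountStones chosen_pot board → Pre_move_stones_player_two amountStones chosen_pot board → Spec_move_stones_player_two amountStones chosen_pot board (move_stones_player_two amountStones chosen_pot board)

-- ===== LEMMAS AND PROOFS =====

-- off the cycle, A's loop body does nothing
lemma pvStep_not_mem (cp : Int) (h : cp ∉ pvCycle) : pvStep cp = cp := by
  simp [pvCycle] at h
  unfold pvStep
  split_ifs with h1 h2 h3 h4 h5 <;> omega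

lemma pvGo_not_mem (n : Nat) (cp : Int) (h : cp ∉ pvCycle) : pvGo n cp = cp := by
  induction n with
  | zero => rfl
  | succ n ih => rw [pvGo, pvStep_not_mem cp h, ih]

lemma pvGo_add (a b : Nat) (cp : Int) : pvGo (a + b) cp = pvGo b (pvGo a cp) := by
  induction a generalizing cp with
  | zero => rw [Nat.zero_add]; rfl
  | succ a ih =>
    have : a + 1 + b = (a + b) + 1 := by omega
    rw [this, pvGo, pvGo, ih]

lemma pvGo_13 (cp : Int) (h : cp ∈ pvCycle) : pvGo 13 cp = cp := by
  fin_cases h <;> decide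

lemma pvGo_mod (cp : Int) (h : cp ∈ pvCycle) (n : Nat) : pvGo n cp = pvGo (n % 13) cp := by
  induction n using Nat.strong_induction_on with
  | _ n ih =>
    by_cases hn : n < 13
    · rw [Nat.mod_eq_of_lt hn]
    · have h1 : n = 13 + (n - 13) := by omega
      have h2 : (n - 13) % 13 = n % 13 := by omega
      calc pvGo n cp = pvGo (13 + (n - 13)) cp := by rw [← h1]
        _ = pvGo (n - 13) (pvGo 13 cp) := pvGo_add _ _ _
        _ = pvGo (n - 13) cp := by rw [pvGo_13 cp h]
        _ = pvGo ((n - 13) % 13) cp := ih _ (by omega)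
        _ = pvGo (n % 13) cp := by rw [h2]

-- the finite core: 13 start pots × 13 residues, checked by the kernel
lemma pvGo_small : ∀ cp ∈ pvCycle, ∀ m < 13,
    pvGo m cp = pvCycle.getD ((pvCycle.idxOf cp + m) % 13) 0 := by decide

lemma pvIndex?_mem : ∀ cp ∈ pvCycle, PySem.List.index? pvCycle cp = some (pvCycle.idxOf cp) := by
  decide

theorem move_stones_player_two_spec : Claim_equal_move_stones_player_two := by
  intro a cp board _hdom _hpre
  unfold Spec_move_stones_player_two move_stones_player_two move_stones_player_two_alt
  by_cases ha : a ≤ 0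
  · have h0 : a.toNat = 0 := Int.toNat_of_nonpos ha
    rw [h0, if_pos (Or.inl ha)]; rfl
  · rw [Int.not_le] at ha
    by_cases hm : cp ∈ pvCycle
    · rw [if_neg (by simp [hm]; omega)]
      rw [pvIndex?_mem cp hm]
      show pvGo a.toNat cp = PySem.List.pyGetD pvCycle (PySem.Int.mod ((pvCycle.idxOf cp : Int) + a) 13) 0
      set n := a.toNat with hn
      have han : (n : Int) = a := Int.toNat_of_nonneg (le_of_lt ha)
      set p := pvCycle.idxOf cp with hp
      have hmod : PySem.Int.mod ((p : Int) + a) 13 = (((p + n) % 13 : Nat) : Int) := by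
        rw [← han]
        have : ((p : Int) + (n : Int)) = ((p + n : Nat) : Int) := by push_cast; ring
        rw [this]
        exact_mod_cast PySem.Int.mod_natCast (p + n) 13
      rw [hmod, PySem.List.pyGetD_natCast]
      have hsplit : (p + n) % 13 = (p + n % 13) % 13 := by omega
      rw [pvGo_mod cp hm n, pvGo_small cp hm (n % 13) (Nat.mod_lt _ (by omega)), hsplit]
    · rw [pvGo_not_mem _ _ hm, if_pos (Or.inr hm)]
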